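-- pv_equiv track=rewrite | github.com/ChristianEschen/miacag | miacag/plots/plotter.py | select_only_aggregates
-- ===== SOURCE A (Python) =====
-- def select_only_aggregates(segments):
--     pda_names = [i for i in segments if '4_pda' in i]
--     agg_pda_name = [i for i in pda_names if 'lca' not in i]
--     pla_names = [i for i in segments if '16_pla' in i]
--     agg_pla_name = [i for i in pla_names if 'lca' not in i]
--     include = agg_pda_name + agg_pla_name
--     union = pda_names + pla_names
--     exclude = [i for i in union if i not in include]
--     final_segments = [i for i in segments if i not in exclude]
--     return final_segments
-- ===== SOURCE B (Python) =====
-- def select_only_aggregates(segments):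
--     return [i for i in segments
--             if not (('4_pda' in i or '16_pla' in i) and 'lca' in i)]
-- ===== Notes on version B (the rewrite author's own statement) =====
-- stated objective: simpler
-- what changed: Replaces A's five intermediate lists and the quadratic membership filters with a single order-preserving pass applying the drop predicate (('4_pda' in i or '16_pla' in i) and 'lca' in i) inline.
import Mathlib
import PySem

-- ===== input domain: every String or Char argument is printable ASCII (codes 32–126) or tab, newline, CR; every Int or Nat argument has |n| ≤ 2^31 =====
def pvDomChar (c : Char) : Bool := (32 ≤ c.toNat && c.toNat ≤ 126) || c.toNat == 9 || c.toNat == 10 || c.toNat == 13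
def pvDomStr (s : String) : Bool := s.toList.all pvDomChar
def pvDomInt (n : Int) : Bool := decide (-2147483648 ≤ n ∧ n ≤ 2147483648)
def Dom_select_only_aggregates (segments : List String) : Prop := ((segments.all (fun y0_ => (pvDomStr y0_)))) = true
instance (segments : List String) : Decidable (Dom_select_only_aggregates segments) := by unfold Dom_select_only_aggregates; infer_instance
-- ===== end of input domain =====

-- ===== PORT A =====
-- B replaces A's chain of intermediate lists and membership filters with one inline-predicate pass (objective: simpler).
def select_only_aggregates (segments : List String) : List String :=
  let pda_names := segments.filter (fun i => PySem.Str.isIn "4_pda" i)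
  let agg_pda_name := pda_names.filter (fun i => !(PySem.Str.isIn "lca" i))
  let pla_names := segments.filter (fun i => PySem.Str.isIn "16_pla" i)
  let agg_pla_name := pla_names.filter (fun i => !(PySem.Str.isIn "lca" i))
  let include_ := agg_pda_name ++ agg_pla_name
  let union := pda_names ++ pla_names
  let exclude := union.filter (fun i => !(include_.contains i))
  segments.filter (fun i => !(exclude.contains i))

-- ===== PORT B =====
def select_only_aggregates_alt (segments : List String) : List String :=
  segments.filter (fun i =>
    !((PySem.Str.isIn "4_pda" i || PySem.Str.isIn "16_pla" i) && PySem.Str.isIn "lca" i))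

-- ===== PRECONDITION & SPEC =====
def Spec_select_only_aggregates (segments : List String) (out : List String) : Prop := out = select_only_aggregates_alt segments
instance (segments : List String) (out : List String) : Decidable (Spec_select_only_aggregates segments out) := by unfold Spec_select_only_aggregates; infer_instance

-- ===== CLAIM (what is proved, stated in full; the proofs are below) =====
def Claim_equal_select_only_aggregates : Prop := ∀ (segments : List String), Dom_select_only_aggregates segments → Spec_select_only_aggregates segments (select_only_aggregates segments)

-- ===== LEMMAS AND PROOFS =====

-- ===== VERDICT (by name: the statement is the Claim_ definition above) =====
theorem ports_agree (segments : List String) :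
    select_only_aggregates segments = select_only_aggregates_alt segments := by
  unfold select_only_aggregates select_only_aggregates_alt
  apply List.filter_congr
  intro x hx
  congr 1
  rw [Bool.eq_iff_iff]
  simp only [List.contains_iff_mem, List.mem_filter, List.mem_append,
    Bool.not_eq_eq_eq_not, Bool.not_true, Bool.and_eq_true, Bool.or_eq_true,
    Bool.not_eq_true]
  cases h4 : PySem.Str.isIn "4_pda" x <;>
  cases h16 : PySem.Str.isIn "16_pla" x <;>
  cases hl : PySem.Str.isIn "lca" x <;>
  simp_all

theorem select_only_aggregates_spec : Claim_equal_select_only_aggregates := by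
  intro segments _
  unfold Spec_select_only_aggregates
  exact ports_agree segments
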